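-- pv_equiv track=rewrite | github.com/FJustus/AdventOfCode | 2023/day4.py | part2
-- ===== SOURCE A (Python) =====
-- def part2(nums):
--     cardAmount = [1 for s in range(len(nums))]
--     for i, line in enumerate(nums, start=1):
--         points = 0
--         win, guess = line[0].split(), line[1].split()
--
--         for g in guess:
--             if g in win:
--                 points += 1
--
--         for x in range(1,points+1):
--             cardAmount[i+x-1] += cardAmount[i-1]
--
--     return sum(cardAmount)
-- ===== SOURCE B (Python) =====
-- def part2(nums):
--     n = len(nums)
--     extra = [0] * (n + 2)   # difference array of scheduled copy deltas
--     cur = 0                 # running number of extra copies of the current card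
--     acc = 0
--     for i, (win, guess) in enumerate(nums):
--         cur += extra[i]
--         winlist = win.split()
--         matches = 0
--         for g in guess.split():
--             if g in winlist:
--                 matches += 1
--         total = 1 + cur
--         acc += total
--         extra[i + 1] += total
--         extra[min(i + matches + 1, n + 1)] -= total
--     return acc
-- ===== Notes on version B (the rewrite author's own statement) =====
-- stated objective: alternative
-- what changed: A eagerly adds the current card's total into every one of the next `matches` slots of a cardAmount list and sums the list at the end; B keeps a difference array of scheduled copy deltas plus a running active-copy count, doing O(1) bookkeeping per card and accumulating the answer in one sweep.
import Mathlib
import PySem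

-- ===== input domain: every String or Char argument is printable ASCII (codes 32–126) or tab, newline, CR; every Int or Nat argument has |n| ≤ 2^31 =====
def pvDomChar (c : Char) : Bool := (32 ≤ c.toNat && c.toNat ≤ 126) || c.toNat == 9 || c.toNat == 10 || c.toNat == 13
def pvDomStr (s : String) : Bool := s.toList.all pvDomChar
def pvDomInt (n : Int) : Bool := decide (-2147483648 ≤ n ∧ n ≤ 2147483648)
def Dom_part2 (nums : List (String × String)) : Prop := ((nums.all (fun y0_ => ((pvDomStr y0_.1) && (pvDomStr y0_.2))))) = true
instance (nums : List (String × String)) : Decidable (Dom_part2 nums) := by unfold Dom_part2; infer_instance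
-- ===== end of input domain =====

-- B replaces A's eager forward propagation of card copies (a nested write loop into
-- future list slots) by a difference-array sweep with a running copy count: O(1)
-- bookkeeping per card instead of one write per copy (an alternative algorithm).

-- ===== PORT A =====
-- the inner membership-counting loop 'for g in guess: if g in win: points += 1'
def winPoints (win guess : String) : Int :=
  (PySem.Str.split₀ guess).foldl
    (fun p g => if (PySem.Str.split₀ win).contains g then p + 1 else p) 0

-- the inner update loop 'for x in range(1, pts+1): cardAmount[i+x-1] += cardAmount[i-1]'
-- (pySetD/pyGetD: in-range under Pre_part2; Python raises IndexError outside it)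
def loopA (c : List Int) (pts : Int) (i : Int) : List Int :=
  (PySem.List.pyRange 1 (pts + 1) 1).foldl
    (fun c x =>
      PySem.List.pySetD c (i + x - 1)
        (PySem.List.pyGetD c (i + x - 1) 0 + PySem.List.pyGetD c (i - 1) 0)) c

def part2 (nums : List (String × String)) : Int :=
  ((PySem.List.enumerate nums 1).foldl
      (fun c p => loopA c (winPoints p.2.1 p.2.2) p.1)
      ((PySem.List.pyRange 0 (nums.length : Int) 1).map (fun _ => (1 : Int)))).sum

-- ===== PORT B =====
-- one sweep step: read the scheduled delta, count matches, schedule this card's copies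
def stepB (n : ℕ) (st : List Int × Int × Int) (p : Int × (String × String)) :
    List Int × Int × Int :=
  let cur := st.2.1 + PySem.List.pyGetD st.1 p.1 0
  let total := 1 + cur
  let acc := st.2.2 + total
  let extra1 := PySem.List.pySetD st.1 (p.1 + 1) (PySem.List.pyGetD st.1 (p.1 + 1) 0 + total)
  let j := min (p.1 + winPoints p.2.1 p.2.2 + 1) ((n : Int) + 1)
  (PySem.List.pySetD extra1 j (PySem.List.pyGetD extra1 j 0 - total), cur, acc)

def part2_alt (nums : List (String × String)) : Int :=
  ((PySem.List.enumerate nums 0).foldl (stepB nums.length)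
      (PySem.List.pyRepeat [(0 : Int)] ((nums.length : Int) + 2), 0, 0)).2.2

-- ===== PRECONDITION & SPEC =====
-- number of guesses of card k that appear among its winning numbers
def matchCount (win guess : String) : ℕ :=
  (PySem.Str.split₀ guess).countP (fun g => (PySem.Str.split₀ win).contains g)

def mcAt (nums : List (String × String)) (k : ℕ) : ℕ :=
  matchCount (nums.getD k ("", "")).1 (nums.getD k ("", "")).2

-- Pre_: exactly the inputs where every write cardAmount[i+x-1] stays in range;
-- on any other input A raises IndexError (it returns no value there).
def Pre_part2 (nums : List (String × String)) : Prop :=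
  ∀ k < nums.length, mcAt nums k + k + 1 ≤ nums.length
instance (nums : List (String × String)) : Decidable (Pre_part2 nums) := by
  unfold Pre_part2; infer_instance

def pvWitness_part2 : (List (String × String)) := [("a", "a"), ("x", "y")]

def Spec_part2 (nums : List (String × String)) (out : Int) : Prop := out = part2_alt nums
instance (nums : List (String × String)) (out : Int) : Decidable (Spec_part2 nums out) := by unfold Spec_part2; infer_instance

-- ===== CLAIM (what is proved, stated in full; the proofs are below) =====
def Claim_equal_part2 : Prop := ∀ (nums : List (String × String)), Dom_part2 nums → Pre_part2 nums → Spec_part2 nums (part2 nums)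

-- ===== LEMMAS AND PROOFS =====
-- t-values: tvec m k lists the final copy-counts of cards 0..k-1
def tvec (m : ℕ → ℕ) : ℕ → List ℤ
  | 0 => []
  | k+1 => tvec m k ++
      [1 + ((List.range k).map (fun p => if k ≤ p + m p then (tvec m k).getD p 0 else 0)).sum]

def tf (m : ℕ → ℕ) (k : ℕ) : ℤ := (tvec m (k+1)).getD k 0

theorem tvec_length (m : ℕ → ℕ) (k : ℕ) : (tvec m k).length = k := by
  induction k with
  | zero => rfl
  | succ k ih => simp [tvec, ih]

theorem tvec_getD (m : ℕ → ℕ) {k k' p : ℕ} (h : p < k) (h2 : k ≤ k') :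
    (tvec m k').getD p 0 = (tvec m k).getD p 0 := by
  induction k' with
  | zero => omega
  | succ k' ih =>
      by_cases hk : k ≤ k'
      · rw [tvec, List.getD_append _ _ _ _ (by rw [tvec_length]; omega)]
        exact ih hk
      · have : k = k' + 1 := by omega
        subst this; rfl

theorem tf_lt (m : ℕ → ℕ) {p k : ℕ} (h : p < k) : (tvec m k).getD p 0 = tf m p :=
  tvec_getD m (Nat.lt_succ_self p) h

def Ssum (m : ℕ → ℕ) (k : ℕ) : ℤ :=
  ((List.range k).map (fun p => if k ≤ p + m p then tf m p else 0)).sum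

theorem tf_eq (m : ℕ → ℕ) (k : ℕ) : tf m k = 1 + Ssum m k := by
  unfold tf Ssum
  rw [tvec, List.getD_append_right _ _ _ _ (by rw [tvec_length])]
  rw [tvec_length, Nat.sub_self]
  simp only [List.getD_cons_zero]
  congr 1
  apply congrArg
  apply List.map_congr_left
  intro p hp
  rw [tf_lt m (List.mem_range.mp hp)]
theorem getD_set_int (xs : List ℤ) (n j : ℕ) (v : ℤ) :
    (xs.set n v).getD j 0 = if n = j ∧ j < xs.length then v else xs.getD j 0 := by
  simp only [List.getD_eq_getElem?_getD, List.getElem?_set]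
  split_ifs with h1 h2 h3 h3 <;> simp_all

theorem loopA_spec (c : List Int) (k r : ℕ) :
    (loopA c (r : Int) ((k : Int) + 1)).length = c.length ∧
    ∀ j : ℕ, (loopA c (r : Int) ((k : Int) + 1)).getD j 0 =
      c.getD j 0 + if k + 1 ≤ j ∧ j ≤ k + r ∧ j < c.length then c.getD k 0 else 0 := by
  induction r with
  | zero =>
      have h0 : PySem.List.pyRange 1 (((0:ℕ):Int) + 1) 1 = [] :=
        @PySem.List.pyRange_one_eq_nil 1 (((0:ℕ):Int) + 1) (by norm_num)
      rw [loopA, h0]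
      constructor
      · rfl
      · intro j
        simp only [List.foldl_nil]
        have : ¬ (k + 1 ≤ j ∧ j ≤ k + 0 ∧ j < c.length) := by omega
        rw [if_neg this]; ring
  | succ r ih =>
      obtain ⟨ihlen, ihget⟩ := ih
      have hsplit : PySem.List.pyRange 1 ((r : Int) + 1 + 1) 1
          = PySem.List.pyRange 1 ((r : Int) + 1) 1 ++ [(r : Int) + 1] := by
        have := @PySem.List.pyRange_one_succ_right 1 ((r : Int) + 1) (by omega)
        simpa using this
      have hrw : loopA c ((r : Int) + 1) ((k : Int) + 1)
          = (loopA c (r : Int) ((k : Int) + 1)).set (k + r + 1)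
              ((loopA c (r : Int) ((k : Int) + 1)).getD (k + r + 1) 0
                + (loopA c (r : Int) ((k : Int) + 1)).getD k 0) := by
        rw [loopA, hsplit, List.foldl_append]
        rw [← loopA]
        set c' := loopA c (r : Int) ((k : Int) + 1)
        simp only [List.foldl_cons, List.foldl_nil]
        have e1 : (k : Int) + 1 + ((r : Int) + 1) - 1 = ((k + r + 1 : ℕ) : Int) := by push_cast; ring
        have e2 : (k : Int) + 1 - 1 = ((k : ℕ) : Int) := by ring
        rw [e1, e2, PySem.List.pySetD_natCast, PySem.List.pyGetD_natCast, PySem.List.pyGetD_natCast]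
      have hc1 : (loopA c (r : Int) ((k : Int) + 1)).getD (k + r + 1) 0 = c.getD (k + r + 1) 0 := by
        rw [ihget]; rw [if_neg (by omega)]; ring
      have hc2 : (loopA c (r : Int) ((k : Int) + 1)).getD k 0 = c.getD k 0 := by
        rw [ihget]; rw [if_neg (by omega)]; ring
      have hcast : ((r + 1 : ℕ) : Int) = (r : Int) + 1 := by push_cast; ring
      rw [hcast]
      constructor
      · rw [hrw, List.length_set, ihlen]
      · intro j
        rw [hrw, getD_set_int, ihlen, hc1, hc2, ihget]
        by_cases hj : k + r + 1 = j ∧ j < c.length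
        · rw [if_pos hj, if_pos (show k + 1 ≤ j ∧ j ≤ k + (r + 1) ∧ j < c.length by omega)]
          rw [← hj.1]
        · rw [if_neg hj]
          by_cases h2 : k + 1 ≤ j ∧ j ≤ k + r ∧ j < c.length
          · rw [if_pos h2, if_pos (by omega)]
          · rw [if_neg h2, if_neg (by omega)]
theorem winPoints_eq (w g : String) : winPoints w g = (matchCount w g : ℤ) := by
  unfold winPoints matchCount
  rw [PySem.List.foldl_if_add_one, zero_add]

theorem initA_eq (n : ℕ) :
    ((PySem.List.pyRange 0 (n : Int) 1).map (fun _ => (1 : Int))) = List.replicate n 1 := by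
  rw [PySem.List.pyRange_zero_nat]
  simp [List.map_map, List.eq_replicate_iff]

def prefA (nums : List (String × String)) (k : ℕ) : List Int :=
  (PySem.List.enumerate (nums.take k) 1).foldl
    (fun c p => loopA c (winPoints p.2.1 p.2.2) p.1)
    ((PySem.List.pyRange 0 (nums.length : Int) 1).map (fun _ => (1 : Int)))

theorem part2_eq_prefA (nums : List (String × String)) :
    part2 nums = (prefA nums nums.length).sum := by
  rw [part2, prefA, List.take_length]

theorem mcAt_eq (nums : List (String × String)) (k : ℕ) (h : k < nums.length) :
    winPoints (nums[k].1) (nums[k].2) = ((mcAt nums k : ℕ) : ℤ) := by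
  rw [winPoints_eq]
  unfold mcAt
  rw [List.getD_eq_getElem _ _ h]

theorem prefA_succ (nums : List (String × String)) (k : ℕ) (h : k < nums.length) :
    prefA nums (k+1) = loopA (prefA nums k) ((mcAt nums k : ℕ) : ℤ) ((k : ℤ) + 1) := by
  unfold prefA
  rw [List.take_add_one, List.getElem?_eq_getElem h]
  rw [show ((some nums[k]).toList : List (String × String)) = [nums[k]] from rfl]
  rw [PySem.List.enumerate_append, List.foldl_append]
  simp only [PySem.List.enumerate_cons, PySem.List.enumerate_nil, List.foldl_cons, List.foldl_nil]
  rw [mcAt_eq nums k h]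
  rw [List.length_take, Nat.min_eq_left (Nat.le_of_lt h)]
  ring_nf

def pastA (m : ℕ → ℕ) (k j : ℕ) : ℤ :=
  ((List.range k).map (fun p => if p < j ∧ j ≤ p + m p then tf m p else 0)).sum

theorem pastA_succ (m : ℕ → ℕ) (k j : ℕ) :
    pastA m (k+1) j = pastA m k j + (if k < j ∧ j ≤ k + m k then tf m k else 0) := by
  simp [pastA, List.range_succ]

theorem pastA_self (m : ℕ → ℕ) (k : ℕ) : pastA m k k = Ssum m k := by
  unfold pastA Ssum
  congr 1
  apply List.map_congr_left
  intro p hp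
  have := List.mem_range.mp hp
  by_cases hc : k ≤ p + m p
  · rw [if_pos ⟨this, hc⟩, if_pos hc]
  · rw [if_neg (by tauto), if_neg hc]

theorem pastA_ge (m : ℕ → ℕ) {k j : ℕ} (h : j ≤ k) : pastA m k j = pastA m j j := by
  induction k with
  | zero => have : j = 0 := by omega
            subst this; rfl
  | succ k ih =>
      by_cases hk : j ≤ k
      · rw [pastA_succ, if_neg (by omega), add_zero, ih hk]
      · have : j = k + 1 := by omega
        subst this; rfl
theorem prefA_zero (nums : List (String × String)) :
    prefA nums 0 = List.replicate nums.length 1 := by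
  unfold prefA
  rw [List.take_zero, PySem.List.enumerate_nil, List.foldl_nil, initA_eq]

theorem A_inv (nums : List (String × String)) (k : ℕ)
    (hk : k ≤ nums.length) :
    (prefA nums k).length = nums.length ∧
    ∀ j < nums.length, (prefA nums k).getD j 0 = 1 + pastA (mcAt nums) k j := by
  induction k with
  | zero =>
      rw [prefA_zero]
      refine ⟨List.length_replicate, fun j hj => ?_⟩
      rw [List.getD_eq_getElem _ _ (by simpa using hj), List.getElem_replicate]
      simp [pastA]
  | succ k ih =>
      have hkn : k < nums.length := by omega
      obtain ⟨ihl, ihg⟩ := ih (by omega)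
      rw [prefA_succ nums k hkn]
      obtain ⟨hlen, hget⟩ := loopA_spec (prefA nums k) k (mcAt nums k)
      have hgk : (prefA nums k).getD k 0 = tf (mcAt nums) k := by
        rw [ihg k hkn, pastA_self, ← tf_eq]
      refine ⟨by rw [hlen, ihl], fun j hj => ?_⟩
      rw [hget j, pastA_succ, ihg j hj, hgk, ihl]
      by_cases hc : k < j ∧ j ≤ k + mcAt nums k
      · rw [if_pos ⟨by omega, hc.2, hj⟩, if_pos hc]
        ring
      · rw [if_neg (by tauto), if_neg hc]
        ring
theorem A_final (nums : List (String × String)) :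
    part2 nums = ((List.range nums.length).map (tf (mcAt nums))).sum := by
  rw [part2_eq_prefA]
  obtain ⟨hl, hg⟩ := A_inv nums nums.length le_rfl
  have heq : prefA nums nums.length = (List.range nums.length).map (tf (mcAt nums)) := by
    apply List.ext_getElem (by simp [hl])
    intro i h1 h2
    have hi : i < nums.length := by rwa [hl] at h1
    rw [List.getElem_map, List.getElem_range, ← List.getD_eq_getElem _ (0:ℤ) h1,
      hg i hi, pastA_ge _ (le_of_lt hi), pastA_self, ← tf_eq]
  rw [heq]
def eminf (m : ℕ → ℕ) (n p : ℕ) : ℕ := min (p + m p + 1) (n + 1)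

def Dsum (m : ℕ → ℕ) (n k q : ℕ) : ℤ :=
  ((List.range k).map (fun p =>
    tf m p * ((if q = p + 1 then (1:ℤ) else 0) - (if q = eminf m n p then 1 else 0)))).sum

theorem Dsum_succ (m : ℕ → ℕ) (n k q : ℕ) :
    Dsum m n (k+1) q = Dsum m n k q
      + tf m k * ((if q = k + 1 then (1:ℤ) else 0) - (if q = eminf m n k then 1 else 0)) := by
  simp [Dsum, List.range_succ]

theorem key_lemma (m : ℕ → ℕ) (n k : ℕ) (hk : k ≤ n) :
    ((List.range (k+1)).map (fun q => Dsum m n q q)).sum = Ssum m k := by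
  have h1 : ((List.range (k+1)).map (fun q => Dsum m n q q)).sum
      = ∑ q ∈ Finset.range (k+1), ∑ p ∈ Finset.range q,
          tf m p * ((if q = p + 1 then (1:ℤ) else 0) - (if q = eminf m n p then 1 else 0)) := rfl
  rw [h1]
  have h2 : ∀ q ∈ Finset.range (k+1),
      (∑ p ∈ Finset.range q,
          tf m p * ((if q = p + 1 then (1:ℤ) else 0) - (if q = eminf m n p then 1 else 0)))
      = ∑ p ∈ Finset.range k,
          tf m p * ((if q = p + 1 then (1:ℤ) else 0) - (if q = eminf m n p then 1 else 0)) := by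
    intro q hq
    have hq' : q ≤ k := by simpa using Nat.lt_succ_iff.mp (Finset.mem_range.mp hq)
    apply Finset.sum_subset
    · intro x hx
      exact Finset.mem_range.mpr (lt_of_lt_of_le (Finset.mem_range.mp hx) hq')
    · intro p hpmem hpq
      have hpk2 : p < k := Finset.mem_range.mp hpmem
      have hp : q ≤ p := by
        by_contra hcon
        exact hpq (Finset.mem_range.mpr (by omega))
      have h1 : ¬ (q = p + 1) := by omega
      have h2 : ¬ (q = eminf m n p) := by unfold eminf; omega
      rw [if_neg h1, if_neg h2]
      ring
  rw [Finset.sum_congr rfl h2, Finset.sum_comm]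
  have h3 : ∀ p ∈ Finset.range k,
      (∑ q ∈ Finset.range (k+1),
          tf m p * ((if q = p + 1 then (1:ℤ) else 0) - (if q = eminf m n p then 1 else 0)))
      = if k ≤ p + m p then tf m p else 0 := by
    intro p hp
    have hpk : p < k := Finset.mem_range.mp hp
    have hsplit : ∀ q, tf m p * ((if q = p + 1 then (1:ℤ) else 0) - (if q = eminf m n p then 1 else 0))
        = (if q = p + 1 then tf m p else 0) - (if q = eminf m n p then tf m p else 0) := by
      intro q; split_ifs <;> ring
    rw [Finset.sum_congr rfl (fun q _ => hsplit q), Finset.sum_sub_distrib,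
      Finset.sum_ite_eq' _ (p+1) (fun _ => tf m p), Finset.sum_ite_eq' _ (eminf m n p) (fun _ => tf m p)]
    rw [if_pos (Finset.mem_range.mpr (by omega))]
    by_cases he : eminf m n p ∈ Finset.range (k+1)
    · have : p + m p + 1 ≤ k := by
        have := Finset.mem_range.mp he
        unfold eminf at this; omega
      rw [if_pos he, if_neg (by omega)]; ring
    · have : ¬ (p + m p + 1 ≤ k) := by
        intro hc
        exact he (Finset.mem_range.mpr (by unfold eminf; omega))
      rw [if_neg he, if_pos (by omega)]; ring
  rw [Finset.sum_congr rfl h3]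
  rfl
theorem stepB_eq (n k : ℕ) (a : String × String) (st : List Int × Int × Int) :
    stepB n st ((k : ℤ), a) =
      ((st.1.set (k+1) (st.1.getD (k+1) 0 + (1 + (st.2.1 + st.1.getD k 0)))).set
          (min (k + matchCount a.1 a.2 + 1) (n+1))
          ((st.1.set (k+1) (st.1.getD (k+1) 0 + (1 + (st.2.1 + st.1.getD k 0)))).getD
              (min (k + matchCount a.1 a.2 + 1) (n+1)) 0 - (1 + (st.2.1 + st.1.getD k 0))),
        st.2.1 + st.1.getD k 0,
        st.2.2 + (1 + (st.2.1 + st.1.getD k 0))) := by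
  unfold stepB
  rw [winPoints_eq]
  have c1 : (k : ℤ) + 1 = ((k + 1 : ℕ) : ℤ) := by push_cast; ring
  have c2 : (k : ℤ) + ((matchCount a.1 a.2 : ℕ) : ℤ) + 1
      = ((k + matchCount a.1 a.2 + 1 : ℕ) : ℤ) := by push_cast; ring
  have c3 : (n : ℤ) + 1 = ((n + 1 : ℕ) : ℤ) := by push_cast; ring
  rw [c1, c2, c3, ← Nat.cast_min]
  simp only [PySem.List.pyGetD_natCast, PySem.List.pySetD_natCast]

def prefB (nums : List (String × String)) (k : ℕ) : List Int × Int × Int :=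
  (PySem.List.enumerate (nums.take k) 0).foldl (stepB nums.length)
    (PySem.List.pyRepeat [(0 : Int)] ((nums.length : Int) + 2), 0, 0)

theorem part2_alt_eq_prefB (nums : List (String × String)) :
    part2_alt nums = (prefB nums nums.length).2.2 := by
  rw [part2_alt, prefB, List.take_length]

theorem prefB_succ (nums : List (String × String)) (k : ℕ) (h : k < nums.length) :
    prefB nums (k+1) = stepB nums.length (prefB nums k) ((k : ℤ), nums[k]) := by
  unfold prefB
  rw [List.take_add_one, List.getElem?_eq_getElem h]
  rw [show ((some nums[k]).toList : List (String × String)) = [nums[k]] from rfl]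
  rw [PySem.List.enumerate_append, List.foldl_append]
  simp only [PySem.List.enumerate_cons, PySem.List.enumerate_nil, List.foldl_cons, List.foldl_nil]
  rw [List.length_take, Nat.min_eq_left (Nat.le_of_lt h)]
  norm_num

theorem B_inv (nums : List (String × String)) (k : ℕ) (hk : k ≤ nums.length) :
    (prefB nums k).1.length = nums.length + 2 ∧
    (∀ q : ℕ, (prefB nums k).1.getD q 0 = Dsum (mcAt nums) nums.length k q) ∧
    (prefB nums k).2.1 = ((List.range k).map (fun q => Dsum (mcAt nums) nums.length q q)).sum ∧
    (prefB nums k).2.2 = ((List.range k).map (tf (mcAt nums))).sum := by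
  induction k with
  | zero =>
      have h0 : prefB nums 0
          = (PySem.List.pyRepeat [(0 : Int)] ((nums.length : Int) + 2), 0, 0) := by
        unfold prefB
        rw [List.take_zero, PySem.List.enumerate_nil, List.foldl_nil]
      rw [h0, PySem.List.pyRepeat_singleton,
        show ((nums.length : ℤ) + 2).toNat = nums.length + 2 from by omega]
      refine ⟨List.length_replicate, fun q => ?_, by simp, by simp⟩
      simp [Dsum, List.getD_eq_getElem?_getD, List.getElem?_replicate]
      split_ifs <;> rfl
  | succ k ih =>
      have hkn : k < nums.length := by omega
      obtain ⟨ihlen, ihget, ihcur, ihacc⟩ := ih (by omega)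
      rw [prefB_succ nums k hkn, stepB_eq]
      have hmc : matchCount nums[k].1 nums[k].2 = mcAt nums k := by
        unfold mcAt
        rw [List.getD_eq_getElem _ _ hkn]
      have hemin : min (k + matchCount nums[k].1 nums[k].2 + 1) (nums.length + 1)
          = eminf (mcAt nums) nums.length k := by
        rw [hmc]; rfl
      have hcur' : (prefB nums k).2.1 + (prefB nums k).1.getD k 0
          = ((List.range (k+1)).map (fun q => Dsum (mcAt nums) nums.length q q)).sum := by
        rw [ihcur, ihget, List.range_succ]; simp
      have htot : 1 + ((prefB nums k).2.1 + (prefB nums k).1.getD k 0) = tf (mcAt nums) k := by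
        rw [hcur', key_lemma _ _ _ (le_of_lt hkn), ← tf_eq]
      refine ⟨?_, ?_, hcur', ?_⟩
      · simp only [List.length_set]; exact ihlen
      · intro q
        rw [hemin, htot]
        simp only [getD_set_int, List.length_set, ihlen, ihget, Dsum_succ]
        have he_le : eminf (mcAt nums) nums.length k ≤ nums.length + 1 := Nat.min_le_right _ _
        by_cases hqe : eminf (mcAt nums) nums.length k = q
        · rw [if_pos ⟨hqe, by omega⟩]
          by_cases h1 : k + 1 = eminf (mcAt nums) nums.length k
          · rw [if_pos ⟨h1, by omega⟩, if_pos (show q = k + 1 from by omega),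
              if_pos (show q = eminf (mcAt nums) nums.length k from hqe.symm)]
            rw [show q = k + 1 from by omega]
            ring
          · rw [if_neg (fun hc => h1 hc.1), if_neg (show ¬ q = k + 1 from by omega),
              if_pos (show q = eminf (mcAt nums) nums.length k from hqe.symm)]
            rw [show q = eminf (mcAt nums) nums.length k from hqe.symm]
            ring
        · rw [if_neg (fun hc => hqe hc.1)]
          by_cases hq1 : k + 1 = q
          · rw [if_pos ⟨hq1, by omega⟩, if_pos (show q = k + 1 from by omega),
              if_neg (show ¬ q = eminf (mcAt nums) nums.length k from by omega)]
            rw [show q = k + 1 from by omega]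
            ring
          · rw [if_neg (fun hc => hq1 hc.1), if_neg (show ¬ q = k + 1 from by omega),
              if_neg (show ¬ q = eminf (mcAt nums) nums.length k from by omega)]
            ring
      · rw [ihacc, htot, List.range_succ]; simp

theorem B_final (nums : List (String × String)) :
    part2_alt nums = ((List.range nums.length).map (tf (mcAt nums))).sum := by
  rw [part2_alt_eq_prefB]
  exact (B_inv nums nums.length le_rfl).2.2.2

-- ===== VERDICT (by name: the statement is the Claim_ definition above) =====
theorem part2_spec : Claim_equal_part2 := by
  intro nums _ hpre
  unfold Spec_part2
  rw [A_final nums, B_final nums]
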